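-- pv_equiv track=rewrite | github.com/leofdgit/codeChallenges | Python/General_algs/unique_char_substring.py | lenLongestSubstring
-- ===== SOURCE A (Python) =====
-- def lenLongestSubstring(strn):
--     '''
--     This function takes as input a string s and returns the longest substring whose characters are unique.
--
--     The maximum length of such a substring is equal to the number of characters in the alphabet used to construct the string.
--     If only lower case numbers are considered then the maximum length is 26, whereas a string containing upper and lower case
--     characters could contain a unique substring of length 52.
--     '''
--     if len(strn) == 0:
--         return 0
--     largest_len = 0
--     counter = 0
--     dic = {}
--     for i in strn:
--         if i in dic:
--             if counter > largest_len:
--                 largest_len = counter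
--             counter = 0
--             dic = {}
--         counter += 1
--         dic[i] = 1
--     largest_len = max(counter, largest_len)
--     return largest_len
-- ===== SOURCE B (Python) =====
-- def lenLongestSubstring(strn):
--     best = 0
--     s = strn
--     while s:
--         # longest duplicate-free prefix of s, found by testing prefix
--         # slices wholesale: s[:m] is duplicate-free iff len(set(s[:m])) == m
--         m = 1
--         while m < len(s) and len(set(s[:m + 1])) == m + 1:
--             m += 1
--         if m > best:
--             best = m
--         s = s[m:]
--     return best
-- ===== Notes on version B (the rewrite author's own statement) =====
-- stated objective: alternative
-- what changed: A's single flat pass with a running seen-dict reset in place is replaced by a segment-slicing scheme: repeatedly find the longest duplicate-free prefix by testing whole prefix slices with len(set(prefix)) == len(prefix), record its length, and slice it off the string.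
import Mathlib
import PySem

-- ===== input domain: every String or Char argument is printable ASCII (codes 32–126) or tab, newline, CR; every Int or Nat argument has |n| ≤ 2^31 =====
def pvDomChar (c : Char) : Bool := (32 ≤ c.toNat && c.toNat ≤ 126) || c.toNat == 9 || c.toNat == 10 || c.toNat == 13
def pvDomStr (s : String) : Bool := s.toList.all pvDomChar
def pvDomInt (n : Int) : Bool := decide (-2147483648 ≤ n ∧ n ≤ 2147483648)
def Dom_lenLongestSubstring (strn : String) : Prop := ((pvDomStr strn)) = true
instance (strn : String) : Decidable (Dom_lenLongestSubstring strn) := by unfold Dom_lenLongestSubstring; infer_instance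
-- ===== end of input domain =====

-- B replaces A's flat pass (running seen-dict reset in place) by a segment-slicing scheme:
-- find the longest duplicate-free prefix by whole-prefix set-cardinality tests, record its
-- length, slice it off; alternative decomposition (no speed claim).

-- ===== PORT A =====
def stepA (st : Int × Int × PySem.Dict Char Int) (i : Char) : Int × Int × PySem.Dict Char Int :=
  let largest := st.1
  let counter := st.2.1
  let dic := st.2.2
  let st' :=
    if dic.contains i then
      ((if counter > largest then counter else largest), (0 : Int), (PySem.Dict.empty : PySem.Dict Char Int))
    else (largest, counter, dic)
  (st'.1, st'.2.1 + 1, st'.2.2.insert i 1)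

def lenLongestSubstring (strn : String) : Int :=
  if PySem.Str.len strn == 0 then 0
  else
    let st := strn.toList.foldl stepA (0, 0, PySem.Dict.empty)
    max st.2.1 st.1

-- ===== PORT B =====
-- inner while loop of Source B: `while m < len(s) and len(set(s[:m+1])) == m+1: m += 1`.
-- m is a nonneg Python int kept as Nat; the slices s[:m+1] / s[m:] with nonneg bounds are
-- exactly List.take / List.drop on the char list.
def prefLenB (s : List Char) (m : Nat) : Nat :=
  if m < s.length ∧ PySem.Set.len (PySem.Set.ofList (s.take (m + 1))) == ((m : Int) + 1) then
    prefLenB s (m + 1)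
  else m
termination_by s.length - m

theorem prefLenB_ge (s : List Char) : ∀ m, m ≤ prefLenB s m := by
  intro m
  induction hn : s.length - m using Nat.strong_induction_on generalizing m with
  | _ n ih =>
    rw [prefLenB]
    split
    · rename_i h
      have : s.length - (m + 1) < n := by omega
      exact le_trans (Nat.le_succ m) (ih _ this _ rfl)
    · exact le_refl m

-- outer while loop of Source B over the remaining string
def goB (best : Int) (s : List Char) : Int :=
  match s with
  | [] => best
  | c :: t =>
    let m := prefLenB (c :: t) 1
    goB (if (m : Int) > best then (m : Int) else best) ((c :: t).drop m)
termination_by s.length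
decreasing_by
  have h1 : 1 ≤ prefLenB (c :: t) 1 := prefLenB_ge (c :: t) 1
  simp only [List.length_drop, List.length_cons]
  omega

def lenLongestSubstring_alt (strn : String) : Int := goB 0 strn.toList

-- ===== PRECONDITION & SPEC =====
def Spec_lenLongestSubstring (strn : String) (out : Int) : Prop := out = lenLongestSubstring_alt strn
instance (strn : String) (out : Int) : Decidable (Spec_lenLongestSubstring strn out) := by unfold Spec_lenLongestSubstring; infer_instance

-- ===== CLAIM (what is proved, stated in full; the proofs are below) =====
def Claim_equal_lenLongestSubstring : Prop := ∀ (strn : String), Dom_lenLongestSubstring strn → Spec_lenLongestSubstring strn (lenLongestSubstring strn)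

-- ===== LEMMAS AND PROOFS =====

-- proof-side helper: length of the scan that consumes chars while they are not yet in `seen`
def chunk (seen : PySem.Set Char) : List Char → Nat
  | [] => 0
  | c :: t => if PySem.Set.contains seen c then 0 else chunk (PySem.Set.add seen c) t + 1

-- proof-side helper: segment-at-a-time recursion shared by both sides
def goC (best : Int) (l : List Char) : Int :=
  match l with
  | [] => best
  | c :: t =>
    let k := chunk (PySem.Set.add PySem.Set.empty c) t
    goC (max best ((k : Int) + 1)) (t.drop k)
termination_by l.length
decreasing_by
  simp only [List.length_drop, List.length_cons]
  omega

-- A's fold equals the segment recursion goC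
theorem key_lemma (t : List Char) : ∀ (L c : Int) (seen : PySem.Set Char) (dic : PySem.Dict Char Int),
    (∀ x, dic.contains x = PySem.Set.contains seen x) →
    max (t.foldl stepA (L, c, dic)).2.1 (t.foldl stepA (L, c, dic)).1
      = goC (max L (c + (chunk seen t : Int))) (t.drop (chunk seen t)) := by
  induction t with
  | nil =>
    intro L c seen dic _
    simp [chunk, goC]
    omega
  | cons ch t ih =>
    intro L c seen dic h
    simp only [List.foldl_cons]
    by_cases hc : PySem.Set.contains seen ch = true
    · have hstep : stepA (L, c, dic) ch
          = ((if c > L then c else L), 1, (PySem.Dict.empty : PySem.Dict Char Int).insert ch 1) := by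
        simp only [stepA]
        rw [h ch, hc]
        simp
      have hcmem : ch ∈ seen := by simpa [PySem.Set.contains] using hc
      have hchunk : chunk seen (ch :: t) = 0 := by
        simp [chunk, hcmem]
      have hmem : ∀ x, ((PySem.Dict.empty : PySem.Dict Char Int).insert ch 1).contains x
          = PySem.Set.contains (PySem.Set.add PySem.Set.empty ch) x := by
        intro x
        by_cases hx : x = ch <;>
          simp [PySem.Dict.contains_insert, PySem.Dict.contains_empty, PySem.Set.add,
            PySem.Set.contains, PySem.Set.empty, hx]
      rw [hstep, hchunk, ih (if c > L then c else L) 1 _ _ hmem]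
      simp only [List.drop_zero, goC]
      congr 1
      all_goals (simp only [max_def]; try split_ifs <;> omega)
    · rw [Bool.not_eq_true] at hc
      have hstep : stepA (L, c, dic) ch = (L, c + 1, dic.insert ch 1) := by
        simp only [stepA]
        rw [h ch, hc]
        simp
      have hcm : ch ∉ seen := by
        simpa [PySem.Set.contains] using hc
      have hchunk : chunk seen (ch :: t) = chunk (PySem.Set.add seen ch) t + 1 := by
        simp [chunk, hcm]
      have hmem : ∀ x, (dic.insert ch 1).contains x
          = PySem.Set.contains (PySem.Set.add seen ch) x := by
        intro x
        by_cases hx : x = ch <;>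
          simp [PySem.Dict.contains_insert, h x, PySem.Set.add, PySem.Set.contains, hcm, hx]
      rw [hstep, hchunk, ih L (c + 1) _ _ hmem]
      simp only [List.drop_succ_cons]
      congr 2
      push_cast
      ring

-- bridge: B's inner prefix scan, started after a nodup nonempty consumed prefix p,
-- advances by exactly the chunk length of the rest
theorem bridge (t : List Char) : ∀ (p : List Char), p.Nodup → p ≠ [] →
    prefLenB (p ++ t) p.length = p.length + chunk (PySem.Set.ofList p) t := by
  induction t with
  | nil =>
    intro p _ _
    rw [prefLenB]
    simp [chunk]
  | cons c t ih =>
    intro p hnd hne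
    have hofl : PySem.Set.ofList p = p := PySem.Set.ofList_eq_self_of_nodup p hnd
    have htake : (p ++ c :: t).take (p.length + 1) = p ++ [c] := by
      simp [List.take_append]
    rw [prefLenB, htake]
    by_cases hcp : c ∈ p
    · have hlen : PySem.Set.ofList (p ++ [c]) = p := by
        rw [PySem.Set.ofList_append_singleton, hofl, PySem.Set.add_of_mem hcp]
      have hcond : ¬ (p.length < (p ++ c :: t).length ∧
          PySem.Set.len (PySem.Set.ofList ((p ++ [c]))) == ((p.length : Int) + 1)) := by
        rw [hlen]
        simp [PySem.Set.len]
      rw [if_neg hcond]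
      have : chunk (PySem.Set.ofList p) (c :: t) = 0 := by
        simp [chunk, hofl, PySem.Set.contains, hcp]
      simp [this]
    · have hlen : PySem.Set.ofList (p ++ [c]) = p ++ [c] := by
        rw [PySem.Set.ofList_append_singleton, hofl, PySem.Set.add_of_not_mem hcp]
      have hcond : (p.length < (p ++ c :: t).length ∧
          PySem.Set.len (PySem.Set.ofList ((p ++ [c]))) == ((p.length : Int) + 1)) := by
        constructor
        · simp
        · rw [hlen]; simp [PySem.Set.len]
      rw [if_pos hcond]
      have hnd' : (p ++ [c]).Nodup := by
        simp only [List.nodup_append, List.nodup_cons, List.not_mem_nil, not_false_iff,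
          List.nodup_nil, and_true, true_and, hnd]
        intro a ha b hb
        simp only [List.mem_singleton] at hb
        subst hb
        exact fun hac => hcp (hac ▸ ha)
      have happ : p ++ c :: t = (p ++ [c]) ++ t := by simp
      have hl : p.length + 1 = (p ++ [c]).length := by simp
      rw [happ, hl, ih (p ++ [c]) hnd' (by simp)]
      have hch : chunk (PySem.Set.ofList p) (c :: t)
          = chunk (PySem.Set.add (PySem.Set.ofList p) c) t + 1 := by
        simp [chunk, hofl, PySem.Set.contains, hcp]
      have hmemo : c ∉ PySem.Set.ofList p := by rwa [hofl]
      rw [hch, PySem.Set.add_of_not_mem hmemo, hofl, hlen]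
      simp only [List.length_append, List.length_cons, List.length_nil]
      omega

-- goB (B's outer loop) equals goC
theorem goB_eq_goC (l : List Char) : ∀ best, goB best l = goC best l := by
  induction hn : l.length using Nat.strong_induction_on generalizing l with
  | _ n ih =>
    intro best
    cases l with
    | nil => simp [goB, goC]
    | cons c t =>
      simp only [List.length_cons] at hn
      rw [goB, goC]
      have hb : prefLenB (c :: t) 1 = 1 + chunk (PySem.Set.ofList [c]) t := by
        have := bridge t [c] (by simp) (by simp)
        simpa using this
      have hofl : PySem.Set.ofList [c] = PySem.Set.add PySem.Set.empty c := rfl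
      rw [hb, hofl]
      set k := chunk (PySem.Set.add PySem.Set.empty c) t with hk
      have hdrop : (c :: t).drop (1 + k) = t.drop k := by
        rw [Nat.add_comm]
        simp
      rw [hdrop]
      have hlt : (t.drop k).length < n := by
        simp only [List.length_drop]
        omega
      rw [ih _ hlt _ rfl]
      congr 1
      rw [max_comm]
      simp only [max_def]
      push_cast
      split_ifs <;> omega

-- ===== VERDICT (by name: the statement is the Claim_ definition above) =====
theorem lenLongestSubstring_spec : Claim_equal_lenLongestSubstring := by
  intro strn _
  unfold Spec_lenLongestSubstring lenLongestSubstring lenLongestSubstring_alt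
  rw [goB_eq_goC]
  cases hl : strn.toList with
  | nil =>
    have hlen : (PySem.Str.len strn == 0) = true := by
      simp [PySem.Str.len, hl]
    rw [hlen]
    simp [goC]
  | cons ch t =>
    have hlen : (PySem.Str.len strn == 0) = false := by
      simp [PySem.Str.len, hl]
      omega
    rw [hlen]
    simp only [Bool.false_eq_true, if_false]
    have h0 : ∀ x, (PySem.Dict.empty : PySem.Dict Char Int).contains x
        = PySem.Set.contains (PySem.Set.empty : PySem.Set Char) x := by
      intro x
      simp [PySem.Dict.contains_empty, PySem.Set.contains, PySem.Set.empty]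
    rw [key_lemma (ch :: t) 0 0 PySem.Set.empty PySem.Dict.empty h0]
    have hchunk : chunk PySem.Set.empty (ch :: t)
        = chunk (PySem.Set.add PySem.Set.empty ch) t + 1 := by
      simp [chunk, PySem.Set.contains, PySem.Set.empty]
    rw [hchunk]
    simp only [List.drop_succ_cons, goC]
    congr 1
    push_cast
    omega
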